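-- pv_equiv track=rewrite | github.com/Doublewestie/Chinese-Western-Pareto-Hyper | step4.4_extract_rules.py | get_feasible_intensities
-- ===== SOURCE A (Python) =====
-- def get_feasible_intensities(age_group, activity_score):
--     if age_group <= 2:
--         possible = [1,2,3]
--     elif age_group <= 4:
--         possible = [1,2]
--     else:
--         possible = [1]
--     if activity_score < 40:
--         allowed = [1]
--     elif activity_score < 60:
--         allowed = [1,2]
--     else:
--         allowed = [1,2,3]
--     return [s for s in possible if s in allowed]
-- ===== SOURCE B (Python) =====
-- def get_feasible_intensities(age_group, activity_score):
--     p = 3 if age_group <= 2 else (2 if age_group <= 4 else 1)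
--     a = 1 if activity_score < 40 else (2 if activity_score < 60 else 3)
--     return list(range(1, min(p, a) + 1))
-- ===== Notes on version B (the rewrite author's own statement) =====
-- stated objective: simpler
-- what changed: Replaces the two explicit lists and the membership-filter comprehension with two integer cutoffs and a closed-form range(1, min(p,a)+1), since both lists are prefixes of [1,2,3].
import Mathlib
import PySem

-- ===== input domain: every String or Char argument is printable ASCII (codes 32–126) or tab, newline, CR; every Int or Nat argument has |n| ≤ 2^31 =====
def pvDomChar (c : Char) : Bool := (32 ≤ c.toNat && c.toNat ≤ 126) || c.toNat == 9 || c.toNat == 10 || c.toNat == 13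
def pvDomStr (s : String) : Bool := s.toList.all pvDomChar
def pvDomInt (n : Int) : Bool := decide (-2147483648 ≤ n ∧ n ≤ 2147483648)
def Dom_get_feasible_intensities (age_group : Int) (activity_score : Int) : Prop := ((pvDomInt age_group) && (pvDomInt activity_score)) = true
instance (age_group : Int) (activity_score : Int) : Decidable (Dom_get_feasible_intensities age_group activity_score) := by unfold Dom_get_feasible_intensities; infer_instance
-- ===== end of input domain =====

-- B computes the intersection as a closed-form range from two integer cutoffs instead of filtering one explicit list by membership in another (objective: simpler).


-- ===== PORT A =====
def get_feasible_intensities (age_group : Int) (activity_score : Int) : List Int :=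
  let possible : List Int :=
    if age_group ≤ 2 then [1, 2, 3]
    else if age_group ≤ 4 then [1, 2]
    else [1]
  let allowed : List Int :=
    if activity_score < 40 then [1]
    else if activity_score < 60 then [1, 2]
    else [1, 2, 3]
  possible.filter (fun s => s ∈ allowed)

-- ===== PORT B =====
-- Closed form: both lists are prefixes [1..p] and [1..a]; their intersection is the shorter prefix.
def get_feasible_intensities_alt (age_group : Int) (activity_score : Int) : List Int :=
  let p : Int := if age_group ≤ 2 then 3 else if age_group ≤ 4 then 2 else 1
  let a : Int := if activity_score < 40 then 1 else if activity_score < 60 then 2 else 3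
  PySem.List.pyRange 1 (min p a + 1) 1

-- ===== PRECONDITION & SPEC =====
def Spec_get_feasible_intensities (age_group : Int) (activity_score : Int) (out : List Int) : Prop := out = get_feasible_intensities_alt age_group activity_score
instance (age_group : Int) (activity_score : Int) (out : List Int) : Decidable (Spec_get_feasible_intensities age_group activity_score out) := by unfold Spec_get_feasible_intensities; infer_instance

-- ===== CLAIM (what is proved, stated in full; the proofs are below) =====
def Claim_equal_get_feasible_intensities : Prop := ∀ (age_group : Int) (activity_score : Int), Dom_get_feasible_intensities age_group activity_score → Spec_get_feasible_intensities age_group activity_score (get_feasible_intensities age_group activity_score)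

-- ===== LEMMAS AND PROOFS =====

-- ===== VERDICT (by name: the statement is the Claim_ definition above) =====
theorem get_feasible_intensities_spec : Claim_equal_get_feasible_intensities := by
  intro age_group activity_score _
  unfold Spec_get_feasible_intensities get_feasible_intensities get_feasible_intensities_alt
  split_ifs <;> decide
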